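-- pv_equiv track=rewrite | github.com/a-hiremath/agentic-anki | src/anki_pipeline/normalize.py | _normalize_display_math
-- ===== SOURCE A (Python) =====
-- def _normalize_display_math(text: str) -> str:
--     out: list[str] = []
--     i = 0
--     while i < len(text):
--         if _starts_unescaped(text, i, "$$"):
--             end = _find_matching_double_dollar(text, i + 2)
--             if end != -1:
--                 out.append(r"\[" + text[i + 2:end] + r"\]")
--                 i = end + 2
--                 continue
--         out.append(text[i])
--         i += 1
--     return "".join(out)
--
-- def _find_matching_double_dollar(text: str, start: int) -> int:
--     i = start
--     while i < len(text) - 1: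
--         if _starts_unescaped(text, i, "$$"):
--             return i
--         i += 1
--     return -1
--
-- def _starts_unescaped(text: str, index: int, token: str) -> bool:
--     return text.startswith(token, index) and not _is_escaped(text, index)
--
-- def _is_escaped(text: str, index: int) -> bool:
--     backslashes = 0
--     i = index - 1
--     while i >= 0 and text[i] == "\\":
--         backslashes += 1
--         i -= 1
--     return backslashes % 2 == 1
-- ===== SOURCE B (Python) =====
-- def _normalize_display_math(text: str) -> str:
--     # Single forward pass; `bs` is the running length of the backslash run just
--     # before position i, so escape parity is O(1) instead of a backward rescan.
--     out = []
--     n = len(text)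
--     i = 0
--     bs = 0
--     while i < n:
--         c = text[i]
--         if c == '$' and bs % 2 == 0 and i + 1 < n and text[i + 1] == '$':
--             # unescaped "$$": scan forward for the matching unescaped "$$"
--             j = i + 2
--             b2 = 0
--             while j < n:
--                 if text[j] == '$' and b2 % 2 == 0 and j + 1 < n and text[j + 1] == '$':
--                     break
--                 b2 = b2 + 1 if text[j] == '\\' else 0
--                 j += 1
--             else:
--                 # no closer anywhere ahead: the rest is emitted verbatim
--                 out.append(text[i:])
--                 return ''.join(out)
--             out.append('\\[' + text[i + 2:j] + '\\]')
--             i = j + 2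
--             bs = 0
--             continue
--         out.append(c)
--         bs = bs + 1 if c == '\\' else 0
--         i += 1
--     return ''.join(out)
-- ===== Notes on version B (the rewrite author's own statement) =====
-- stated objective: faster
-- what changed: One fused forward pass keeps a running backslash-run counter so escape parity is O(1) per position (A rescans backwards at every '$$' candidate via helper calls), and an unmatched opener emits the rest of the text verbatim in one step instead of A's per-character retry loop.
import Mathlib
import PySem

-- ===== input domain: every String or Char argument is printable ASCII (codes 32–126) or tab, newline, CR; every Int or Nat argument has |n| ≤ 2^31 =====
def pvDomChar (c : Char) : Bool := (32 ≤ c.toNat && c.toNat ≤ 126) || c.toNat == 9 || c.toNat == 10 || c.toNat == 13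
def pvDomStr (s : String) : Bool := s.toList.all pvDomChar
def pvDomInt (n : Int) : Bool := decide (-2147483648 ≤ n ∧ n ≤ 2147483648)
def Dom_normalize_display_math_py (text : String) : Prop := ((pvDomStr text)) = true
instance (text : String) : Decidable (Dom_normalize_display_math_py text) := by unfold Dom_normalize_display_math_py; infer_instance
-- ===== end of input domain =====

-- B replaces A's backward escape-rescans with one fused forward pass keeping a
-- running backslash-run counter (O(1) escape parity); same output on all inputs.


-- ===== PORT A =====
-- Indices are kept as Nat: in A they start at 0 and only increase (the backward
-- scan's `i >= 0` guard becomes the `0` base case).  Each while-loop is ported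
-- as structural recursion on an explicit fuel counter, always called with
-- enough fuel (the loop index strictly increases each iteration), so the fuel
-- is only a totality guard and never changes the computed value.

-- _is_escaped's backward loop "while i >= 0 and text[i] == '\\'": counter `acc`,
-- cursor = (current Python index)+1, base case 0 = Python's `i < 0`.
def pvEscLoop (cs : List Char) : Nat → Nat → Nat
  | 0, acc => acc
  | j + 1, acc => if cs.getD j ' ' = '\\' then pvEscLoop cs j (acc + 1) else acc

-- _is_escaped(text, index)
def pvIsEscaped (cs : List Char) (index : Nat) : Bool :=
  pvEscLoop cs index 0 % 2 = 1

-- text.startswith("$$", index): hand port, exact for this 2-char token; the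
-- default ' ' is never '$', so out-of-range positions give False as in Python.
def pvStartsDD (cs : List Char) (index : Nat) : Bool :=
  cs.getD index ' ' = '$' ∧ cs.getD (index + 1) ' ' = '$'

-- _starts_unescaped(text, index, "$$")
def pvStartsUnescaped (cs : List Char) (index : Nat) : Bool :=
  pvStartsDD cs index && !pvIsEscaped cs index

-- _find_matching_double_dollar's loop; Python's -1 sentinel is ported as `none`
def pvFindF (cs : List Char) : Nat → Nat → Option Nat
  | 0, _ => none
  | fuel + 1, i =>
    if i < cs.length - 1 then
      if pvStartsUnescaped cs i then some i else pvFindF cs fuel (i + 1)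
    else none

-- _find_matching_double_dollar(text, start)
def pvFind (cs : List Char) (i : Nat) : Option Nat :=
  pvFindF cs (cs.length + 1) i

-- the main while-loop of _normalize_display_math; `acc` is the join of `out`
-- (pieces are appended left to right, so joining as we go is exact);
-- text[i+2:end] = take/drop since 0 ≤ i+2 ≤ end here (Python clamping agrees).
def pvMainA (cs : List Char) : Nat → Nat → List Char → List Char
  | 0, _, acc => acc
  | fuel + 1, i, acc =>
    if i < cs.length then
      if pvStartsUnescaped cs i then
        match pvFind cs (i + 2) with
        | some e =>
            pvMainA cs fuel (e + 2)
              (acc ++ '\\' :: '[' :: ((cs.drop (i + 2)).take (e - (i + 2)) ++ ['\\', ']']))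
        | none => pvMainA cs fuel (i + 1) (acc ++ [cs.getD i ' '])
      else pvMainA cs fuel (i + 1) (acc ++ [cs.getD i ' '])
    else acc

def normalize_display_math_py (text : String) : String :=
  String.ofList (pvMainA text.toList (text.toList.length + 1) 0 [])

-- ===== PORT B =====
-- the inner forward closer scan of Source B; `b2` is the running backslash count
def pvScanF (cs : List Char) : Nat → Nat → Nat → Option Nat
  | 0, _, _ => none
  | fuel + 1, j, b2 =>
    if j < cs.length then
      if cs.getD j ' ' = '$' ∧ b2 % 2 = 0 ∧ cs.getD (j + 1) ' ' = '$' then some j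
      else pvScanF cs fuel (j + 1) (if cs.getD j ' ' = '\\' then b2 + 1 else 0)
    else none

def pvScan (cs : List Char) (j b2 : Nat) : Option Nat :=
  pvScanF cs (cs.length + 1) j b2

-- the main while-loop of Source B; `bs` = running backslash-run length before i;
-- the `else: out.append(text[i:]); return` branch is the `none` arm.
def pvMainB (cs : List Char) : Nat → Nat → Nat → List Char → List Char
  | 0, _, _, acc => acc
  | fuel + 1, i, bs, acc =>
    if i < cs.length then
      if cs.getD i ' ' = '$' ∧ bs % 2 = 0 ∧ cs.getD (i + 1) ' ' = '$' then
        match pvScan cs (i + 2) 0 with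
        | some j =>
            pvMainB cs fuel (j + 2) 0
              (acc ++ '\\' :: '[' :: ((cs.drop (i + 2)).take (j - (i + 2)) ++ ['\\', ']']))
        | none => acc ++ cs.drop i
      else pvMainB cs fuel (i + 1) (if cs.getD i ' ' = '\\' then bs + 1 else 0) (acc ++ [cs.getD i ' '])
    else acc

def normalize_display_math_py_alt (text : String) : String :=
  String.ofList (pvMainB text.toList (text.toList.length + 1) 0 0 [])

-- ===== PRECONDITION & SPEC =====
def Spec_normalize_display_math_py (text : String) (out : String) : Prop := out = normalize_display_math_py_alt text
instance (text : String) (out : String) : Decidable (Spec_normalize_display_math_py text out) := by unfold Spec_normalize_display_math_py; infer_instance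

-- ===== CLAIM (what is proved, stated in full; the proofs are below) =====
def Claim_equal_normalize_display_math_py : Prop := ∀ (text : String), Dom_normalize_display_math_py text → Spec_normalize_display_math_py text (normalize_display_math_py text)

-- ===== LEMMAS AND PROOFS =====

lemma pvEscLoop_acc (cs : List Char) : ∀ j acc, pvEscLoop cs j acc = pvEscLoop cs j 0 + acc := by
  intro j
  induction j with
  | zero => intro acc; simp [pvEscLoop]
  | succ j ih =>
    intro acc
    by_cases h : cs.getD j ' ' = '\\'
    · rw [pvEscLoop, if_pos h, pvEscLoop, if_pos h, ih, ih 1]; omega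
    · rw [pvEscLoop, if_neg h, pvEscLoop, if_neg h]; omega

lemma pvEscLoop_succ (cs : List Char) (j : Nat) :
    pvEscLoop cs (j + 1) 0 = if cs.getD j ' ' = '\\' then pvEscLoop cs j 0 + 1 else 0 := by
  by_cases h : cs.getD j ' ' = '\\'
  · rw [pvEscLoop, if_pos h, if_pos h, pvEscLoop_acc]
  · rw [pvEscLoop, if_neg h, if_neg h]

lemma pvEscLoop_dollar (cs : List Char) (j : Nat) (h : cs.getD j ' ' = '$') :
    pvEscLoop cs (j + 1) 0 = 0 := by
  rw [pvEscLoop_succ, if_neg]; rw [h]; decide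

-- A's condition in Bool form equals B's condition (running parity form)
lemma cond_iff (cs : List Char) (i : Nat) :
    pvStartsUnescaped cs i = true ↔
      (cs.getD i ' ' = '$' ∧ pvEscLoop cs i 0 % 2 = 0 ∧ cs.getD (i + 1) ' ' = '$') := by
  simp only [pvStartsUnescaped, pvStartsDD, pvIsEscaped, Bool.and_eq_true, Bool.not_eq_true',
    decide_eq_true_eq, decide_eq_false_iff_not]
  constructor
  · rintro ⟨⟨h1, h2⟩, h3⟩; exact ⟨h1, by omega, h2⟩
  · rintro ⟨h1, h2, h3⟩; exact ⟨⟨h1, h3⟩, by omega⟩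

lemma pvFindF_out (cs : List Char) (fuel j : Nat) (h : ¬ j < cs.length - 1) :
    pvFindF cs fuel j = none := by
  cases fuel with
  | zero => rfl
  | succ f => rw [pvFindF, if_neg h]

-- B's forward scan with correct running parity computes exactly A's closer search
lemma pvScanF_eq_pvFindF (cs : List Char) :
    ∀ fuel j, pvScanF cs fuel j (pvEscLoop cs j 0) = pvFindF cs fuel j := by
  intro fuel
  induction fuel with
  | zero => intro j; rfl
  | succ f ih =>
    intro j
    by_cases hjl : j < cs.length
    · by_cases hc : cs.getD j ' ' = '$' ∧ pvEscLoop cs j 0 % 2 = 0 ∧ cs.getD (j + 1) ' ' = '$'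
      · -- both find a match at j; in A's loop j < len - 1 since cs[j+1] = '$' is in range
        have hj1 : j + 1 < cs.length := by
          by_contra hge
          have : cs.getD (j + 1) ' ' = ' ' := List.getD_eq_default _ _ (by omega)
          rw [this] at hc; exact absurd hc.2.2 (by decide)
        rw [pvScanF, if_pos hjl, if_pos hc, pvFindF, if_pos (by omega),
          if_pos ((cond_iff cs j).2 hc)]
      · rw [pvScanF, if_pos hjl, if_neg hc, ← pvEscLoop_succ, ih (j + 1)]
        by_cases hlt : j < cs.length - 1
        · rw [pvFindF, if_pos hlt, if_neg (by rw [cond_iff]; exact hc)]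
        · -- j = len - 1: A's loop stops with none; B's recursion at j + 1 ≥ len gives none
          rw [pvFindF_out cs f (j + 1) (by omega), pvFindF_out cs (f + 1) j hlt]
    · rw [pvScanF, if_neg hjl, pvFindF_out cs (f + 1) j (by omega)]

lemma pvScan_eq_pvFind (cs : List Char) (j : Nat) (h : pvEscLoop cs j 0 = 0) :
    pvScan cs j 0 = pvFind cs j := by
  rw [pvScan, pvFind, ← h, pvScanF_eq_pvFindF]

lemma pvFindF_ge (cs : List Char) :
    ∀ fuel i r, pvFindF cs fuel i = some r → i ≤ r := by
  intro fuel
  induction fuel with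
  | zero => intro i r h; exact absurd h (by simp [pvFindF])
  | succ f ih =>
    intro i r h
    by_cases hlt : i < cs.length - 1
    · rw [pvFindF, if_pos hlt] at h
      by_cases hsu : pvStartsUnescaped cs i
      · rw [if_pos hsu, Option.some.injEq] at h; omega
      · rw [if_neg hsu] at h; have := ih (i + 1) r h; omega
    · rw [pvFindF, if_neg hlt] at h; exact absurd h (by simp)

lemma pvScanF_some (cs : List Char) :
    ∀ fuel j b2 r, pvScanF cs fuel j b2 = some r →
      cs.getD r ' ' = '$' ∧ cs.getD (r + 1) ' ' = '$' := by
  intro fuel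
  induction fuel with
  | zero => intro j b2 r h; exact absurd h (by simp [pvScanF])
  | succ f ih =>
    intro j b2 r h
    by_cases hjl : j < cs.length
    · rw [pvScanF, if_pos hjl] at h
      by_cases hc : cs.getD j ' ' = '$' ∧ b2 % 2 = 0 ∧ cs.getD (j + 1) ' ' = '$'
      · rw [if_pos hc, Option.some.injEq] at h; subst h; exact ⟨hc.1, hc.2.2⟩
      · rw [if_neg hc] at h; exact ih _ _ _ h
    · rw [pvScanF, if_neg hjl] at h; exact absurd h (by simp)

-- the fuel is only a guard: any two adequate fuels give the same search result
lemma pvFindF_irrel (cs : List Char) :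
    ∀ f g j, cs.length - j ≤ f → cs.length - j ≤ g → pvFindF cs f j = pvFindF cs g j := by
  intro f
  induction f with
  | zero =>
    intro g j hf _
    rw [show pvFindF cs 0 j = none from rfl, pvFindF_out cs g j (by omega)]
  | succ f ih =>
    intro g j hf hg
    by_cases hlt : j < cs.length - 1
    · cases g with
      | zero => omega
      | succ g =>
        rw [pvFindF, if_pos hlt, pvFindF, if_pos hlt]
        by_cases hsu : pvStartsUnescaped cs j
        · rw [if_pos hsu, if_pos hsu]
        · rw [if_neg hsu, if_neg hsu, ih g (j + 1) (by omega) (by omega)]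
    · rw [pvFindF_out cs _ j hlt, pvFindF_out cs g j hlt]

lemma pvFind_none_mono (cs : List Char) (k : Nat) (h : pvFind cs k = none) :
    pvFind cs (k + 1) = none := by
  by_cases hlt : k < cs.length - 1
  · rw [pvFind, pvFindF, if_pos hlt] at h
    by_cases hsu : pvStartsUnescaped cs k
    · rw [if_pos hsu] at h; exact absurd h (by simp)
    · rw [if_neg hsu] at h
      rw [pvFind, ← pvFindF_irrel cs cs.length (cs.length + 1) (k + 1) (by omega) (by omega)]
      exact h
  · rw [pvFind, pvFindF_out cs _ (k + 1) (by omega)]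

-- once no unescaped closer exists ahead, A copies the rest of the text verbatim
lemma pvMainA_verbatim (cs : List Char) :
    ∀ fuel i acc, cs.length - i < fuel → pvFind cs (i + 1) = none →
      pvMainA cs fuel i acc = acc ++ cs.drop i := by
  intro fuel
  induction fuel with
  | zero => intro i acc hn _; omega
  | succ f ih =>
    intro i acc hn hf
    by_cases hi : i < cs.length
    · have hdrop : cs.drop i = cs.getD i ' ' :: cs.drop (i + 1) := by
        rw [List.getD_eq_getElem _ _ hi, List.drop_eq_getElem_cons hi]
      have hrec : pvMainA cs f (i + 1) (acc ++ [cs.getD i ' ']) = acc ++ cs.drop i := by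
        rw [ih (i + 1) _ (by omega) (pvFind_none_mono cs (i + 1) hf), hdrop]
        simp
      by_cases hsu : pvStartsUnescaped cs i
      · have hf2 : pvFind cs (i + 2) = none := pvFind_none_mono cs (i + 1) hf
        rw [pvMainA, if_pos hi, if_pos hsu, hf2]
        exact hrec
      · rw [pvMainA, if_pos hi, if_neg hsu]; exact hrec
    · rw [pvMainA, if_neg hi, List.drop_eq_nil_of_le (by omega), List.append_nil]

-- the two main loops agree when B's counter carries the true run length
lemma pvMain_eq (cs : List Char) :
    ∀ fuel i acc, cs.length - i < fuel →
      pvMainA cs fuel i acc = pvMainB cs fuel i (pvEscLoop cs i 0) acc := by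
  intro fuel
  induction fuel with
  | zero => intro i acc hn; omega
  | succ f ih =>
    intro i acc hn
    by_cases hi : i < cs.length
    · by_cases hc : cs.getD i ' ' = '$' ∧ pvEscLoop cs i 0 % 2 = 0 ∧ cs.getD (i + 1) ' ' = '$'
      · have hsu : pvStartsUnescaped cs i = true := (cond_iff cs i).2 hc
        have hesc2 : pvEscLoop cs (i + 2) 0 = 0 := pvEscLoop_dollar cs (i + 1) hc.2.2
        have hscan : pvScan cs (i + 2) 0 = pvFind cs (i + 2) := pvScan_eq_pvFind cs (i + 2) hesc2
        rw [pvMainA, if_pos hi, if_pos hsu, pvMainB, if_pos hi, if_pos hc, hscan]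
        cases hfe : pvFind cs (i + 2) with
        | some e =>
          have hge : i + 2 ≤ e := pvFindF_ge cs _ (i + 2) e hfe
          have hdol : cs.getD (e + 1) ' ' = '$' :=
            (pvScanF_some cs _ (i + 2) 0 e (hscan.trans hfe)).2
          have hesc : pvEscLoop cs (e + 2) 0 = 0 := pvEscLoop_dollar cs (e + 1) hdol
          rw [← hesc]
          exact ih (e + 2) _ (by omega)
        | none =>
          rw [pvMainA_verbatim cs f (i + 1) _ (by omega) hfe,
            List.getD_eq_getElem _ _ hi, List.drop_eq_getElem_cons hi]
          simp
      · have hsu : ¬ pvStartsUnescaped cs i = true := by rw [cond_iff]; exact hc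
        rw [pvMainA, if_pos hi, if_neg hsu, pvMainB, if_pos hi, if_neg hc, ← pvEscLoop_succ]
        exact ih (i + 1) _ (by omega)
    · rw [pvMainA, if_neg hi, pvMainB, if_neg hi]

-- ===== VERDICT (by name: the statement is the Claim_ definition above) =====
theorem normalize_display_math_py_spec : Claim_equal_normalize_display_math_py := by
  intro text _
  unfold Spec_normalize_display_math_py normalize_display_math_py normalize_display_math_py_alt
  rw [pvMain_eq text.toList (text.toList.length + 1) 0 [] (by omega)]
  rfl
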